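-- pv_equiv track=rewrite | github.com/pattang56892/python- | 01_GameOfLife/GoL_03.py | pattern_exists_in_grid
-- ===== SOURCE A (Python) =====
-- def pattern_exists_in_grid(grid, pattern):
--     """Check if pattern exists anywhere in grid"""
--     if not pattern or not grid:
--         return False
--
--     rows, cols = len(grid), len(grid[0])
--     p_rows, p_cols = len(pattern), len(pattern[0])
--
--     if p_rows > rows or p_cols > cols:
--         return False
--
--     for i in range(rows - p_rows + 1):
--         for j in range(cols - p_cols + 1):
--             match = True
--             for pi in range(p_rows):
--                 for pj in range(p_cols):
--                     if grid[i+pi][j+pj] != pattern[pi][pj]: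
--                         match = False
--                         break
--                 if not match:
--                     break
--             if match:
--                 return True
--     return False
-- ===== SOURCE B (Python) =====
-- def pattern_exists_in_grid(grid, pattern):
--     """Check if pattern exists anywhere in grid (row-fingerprint matrix + vertical scan)."""
--     if not pattern or not grid:
--         return False
--     R, C = len(grid), len(grid[0])
--     pr, pc = len(pattern), len(pattern[0])
--     if pr > R or pc > C:
--         return False
--     # fingerprint each pattern row: equal rows get equal ids
--     pat_ids = {}
--     nxt = 0
--     prow_ids = []
--     for row in pattern:
--         t = tuple(row[:pc])
--         if t not in pat_ids:
--             pat_ids[t] = nxt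
--             nxt += 1
--         prow_ids.append(pat_ids[t])
--     # id matrix: M[r][j] = fingerprint of the width-pc window of grid row r at column j (-1 = matches no pattern row)
--     M = [[pat_ids.get(tuple(row[j:j + pc]), -1) for j in range(C - pc + 1)]
--          for row in grid]
--     # 1D vertical search for the id sequence prow_ids in each column of M
--     for j in range(C - pc + 1):
--         for i in range(R - pr + 1):
--             if all(M[i + k][j] == prow_ids[k] for k in range(pr)):
--                 return True
--     return False
-- ===== Notes on version B (the rewrite author's own statement) =====
-- stated objective: alternative
-- what changed: A's quadruple nested cell-by-cell scan is replaced by a 2D row-fingerprint search: a dict built once assigns an id to each pattern row, a matrix M of window fingerprints is computed per grid row, and the match test becomes a 1D vertical scan comparing id sequences.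
-- outside the precondition, e.g. on pattern_exists_in_grid([[5, 6], [7]], [[5]]): A returns True, B returns True
import Mathlib
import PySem

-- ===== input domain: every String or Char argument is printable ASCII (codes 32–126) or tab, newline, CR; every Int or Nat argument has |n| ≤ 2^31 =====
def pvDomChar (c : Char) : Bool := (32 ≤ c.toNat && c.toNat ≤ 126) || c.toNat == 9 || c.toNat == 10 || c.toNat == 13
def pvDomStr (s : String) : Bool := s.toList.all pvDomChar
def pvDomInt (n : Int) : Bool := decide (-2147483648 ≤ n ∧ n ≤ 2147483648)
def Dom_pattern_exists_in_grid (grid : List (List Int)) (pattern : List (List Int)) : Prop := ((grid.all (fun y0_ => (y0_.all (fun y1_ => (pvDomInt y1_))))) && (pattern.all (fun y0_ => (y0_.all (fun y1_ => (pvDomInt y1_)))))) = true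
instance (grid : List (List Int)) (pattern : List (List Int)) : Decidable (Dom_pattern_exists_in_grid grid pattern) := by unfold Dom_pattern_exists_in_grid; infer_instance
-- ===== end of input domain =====

-- B replaces A's four nested scans by a per-row window→pattern-row-fingerprint matrix (one dict of
-- pattern rows built once) followed by a 1D vertical id scan; equivalence of the RETURN VALUES is
-- proved on the inputs admitted by Pre_ below.

-- ===== PORT A =====
-- literal transliteration of A: early returns, then the quadruple nested scan; the loop's
-- `match = False; break` / `return True` early exits have exactly the value of short-circuit all/any.
-- Indexing grid[i+pi][j+pj] / pattern[pi][pj] uses in-range nonnegative indices under Pre_, so getD is exact there.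
def pattern_exists_in_grid (grid : List (List Int)) (pattern : List (List Int)) : Bool :=
  if pattern.isEmpty || grid.isEmpty then false else
  if pattern.length > grid.length ∨ (pattern.getD 0 []).length > (grid.getD 0 []).length then false else
  (List.range (grid.length - pattern.length + 1)).any fun i =>
    (List.range ((grid.getD 0 []).length - (pattern.getD 0 []).length + 1)).any fun j =>
      (List.range pattern.length).all fun pi =>
        (List.range (pattern.getD 0 []).length).all fun pj =>
          ((grid.getD (i + pi) []).getD (j + pj) 0) == ((pattern.getD pi []).getD pj 0)

-- ===== PORT B =====
-- the fingerprint loop of Source B: state = (dict window→id, next fresh id, ids of the pattern rows)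
def pvFingerprint (pc : Nat) (pattern : List (List Int)) :
    PySem.Dict (List Int) Int × Int × List Int :=
  pattern.foldl
    (fun st row =>
      let t := row.take pc                 -- tuple(row[:pc]); 0 ≤ pc so take is exact
      match st.1.get? t with
      | some v => (st.1, st.2.1, st.2.2 ++ [v])
      | none   => (st.1.insert t st.2.1, st.2.1 + 1, st.2.2 ++ [st.2.1]))
    (PySem.Dict.empty, 0, [])

-- M[r][j] = fingerprint of the width-pc window of grid row r at column j (-1 = matches no pattern
-- row); row[j:j+pc] with 0 ≤ j is exactly (row.drop j).take pc. Then the 1D vertical scan over M.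
def pattern_exists_in_grid_alt (grid : List (List Int)) (pattern : List (List Int)) : Bool :=
  if pattern.isEmpty || grid.isEmpty then false else
  if pattern.length > grid.length ∨ (pattern.getD 0 []).length > (grid.getD 0 []).length then false else
  (List.range ((grid.getD 0 []).length - (pattern.getD 0 []).length + 1)).any fun j =>
    (List.range (grid.length - pattern.length + 1)).any fun i =>
      (List.range pattern.length).all fun k =>
        (((grid.map (fun row =>
            (List.range ((grid.getD 0 []).length - (pattern.getD 0 []).length + 1)).map
              (fun j => (pvFingerprint (pattern.getD 0 []).length pattern).1.getD
                ((row.drop j).take (pattern.getD 0 []).length) (-1)))).getD (i + k) []).getD j 0)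
          == ((pvFingerprint (pattern.getD 0 []).length pattern).2.2.getD k 0)

-- ===== PRECONDITION & SPEC =====
-- Pre_ excludes ragged (non-rectangular) grids/patterns that reach the main scan: there whether A
-- raises IndexError or returns depends on where the first mismatching cell value happens to lie,
-- and A does raise on part of them; the early-return cases (empty, or oversized pattern) are all admitted.
def Pre_pattern_exists_in_grid (grid : List (List Int)) (pattern : List (List Int)) : Prop :=
  pattern = [] ∨ grid = [] ∨ grid.length < pattern.length ∨
  (grid.getD 0 []).length < (pattern.getD 0 []).length ∨
  ((∀ r ∈ grid, (grid.getD 0 []).length ≤ r.length) ∧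
   (∀ r ∈ pattern, (pattern.getD 0 []).length ≤ r.length))
instance (grid : List (List Int)) (pattern : List (List Int)) : Decidable (Pre_pattern_exists_in_grid grid pattern) := by unfold Pre_pattern_exists_in_grid; infer_instance

def pvWitness_pattern_exists_in_grid : List (List Int) × List (List Int) := ([[1, 2], [3, 4]], [[3]])

def Spec_pattern_exists_in_grid (grid : List (List Int)) (pattern : List (List Int)) (out : Bool) : Prop := out = pattern_exists_in_grid_alt grid pattern
instance (grid : List (List Int)) (pattern : List (List Int)) (out : Bool) : Decidable (Spec_pattern_exists_in_grid grid pattern out) := by unfold Spec_pattern_exists_in_grid; infer_instance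

-- ===== CLAIM (what is proved, stated in full; the proofs are below) =====
def Claim_equal_pattern_exists_in_grid : Prop := ∀ (grid : List (List Int)) (pattern : List (List Int)), Dom_pattern_exists_in_grid grid pattern → Pre_pattern_exists_in_grid grid pattern → Spec_pattern_exists_in_grid grid pattern (pattern_exists_in_grid grid pattern)

-- ===== LEMMAS AND PROOFS =====

-- invariant of the fingerprint fold: the counter is nonnegative, ids are nonnegative and below the
-- counter, distinct keys get distinct ids, the keys are exactly the truncated rows seen so far, and
-- the k-th recorded id is the id the dict assigns to the k-th truncated row
theorem pvFingerprint_inv (pc : Nat) (l : List (List Int)) :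
    0 ≤ (pvFingerprint pc l).2.1
    ∧ (∀ t v, (pvFingerprint pc l).1.get? t = some v → 0 ≤ v ∧ v < (pvFingerprint pc l).2.1)
    ∧ (∀ t t' v, (pvFingerprint pc l).1.get? t = some v →
        (pvFingerprint pc l).1.get? t' = some v → t = t')
    ∧ (∀ t, ((pvFingerprint pc l).1.get? t).isSome = true ↔ t ∈ l.map (fun r => r.take pc))
    ∧ (pvFingerprint pc l).2.2.length = l.length
    ∧ (∀ k, k < l.length →
        (pvFingerprint pc l).1.get? ((l.map (fun r => r.take pc)).getD k []) =
          some ((pvFingerprint pc l).2.2.getD k 0)) := by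
  induction l using List.reverseRecOn with
  | nil =>
    refine ⟨le_refl 0, ?_, ?_, ?_, rfl, ?_⟩ <;>
      simp [pvFingerprint, PySem.Dict.get?_empty]
  | append_singleton l a ih =>
    obtain ⟨h0, h1, h2, h3, h4, h5⟩ := ih
    have hstep : pvFingerprint pc (l ++ [a]) =
        (match (pvFingerprint pc l).1.get? (a.take pc) with
         | some v => ((pvFingerprint pc l).1, (pvFingerprint pc l).2.1,
             (pvFingerprint pc l).2.2 ++ [v])
         | none => ((pvFingerprint pc l).1.insert (a.take pc) (pvFingerprint pc l).2.1,
             (pvFingerprint pc l).2.1 + 1,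
             (pvFingerprint pc l).2.2 ++ [(pvFingerprint pc l).2.1])) := by
      simp [pvFingerprint, List.foldl_append]
    cases h : (pvFingerprint pc l).1.get? (a.take pc) with
    | some v0 =>
      have hstep2 : pvFingerprint pc (l ++ [a]) =
          ((pvFingerprint pc l).1, (pvFingerprint pc l).2.1,
            (pvFingerprint pc l).2.2 ++ [v0]) := by rw [hstep, h]
      rw [hstep2]
      dsimp only
      refine ⟨h0, h1, h2, ?_, by simpa using h4, ?_⟩
      · intro t
        rw [h3 t]
        simp only [List.map_append, List.map_cons, List.map_nil, List.mem_append,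
          List.mem_singleton]
        constructor
        · intro ht; exact Or.inl ht
        · rintro (ht | rfl)
          · exact ht
          · exact (h3 _).mp (by simp [h])
      · intro k hk
        simp only [List.length_append, List.length_cons, List.length_nil] at hk
        rcases (by omega : k < l.length ∨ k = l.length) with hk' | hk'
        · rw [List.map_append, List.getD_append _ _ _ _ (by simpa using hk'),
            List.getD_append _ _ _ _ (by omega), h5 k hk']
        · subst hk'
          rw [List.map_append,
            List.getD_append_right _ _ _ _ (by simp),
            List.getD_append_right _ _ _ _ (by omega)]
          simp only [List.length_map, Nat.sub_self, h4, Nat.sub_self]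
          simpa using h
    | none =>
      have hstep2 : pvFingerprint pc (l ++ [a]) =
          ((pvFingerprint pc l).1.insert (a.take pc) (pvFingerprint pc l).2.1,
            (pvFingerprint pc l).2.1 + 1,
            (pvFingerprint pc l).2.2 ++ [(pvFingerprint pc l).2.1]) := by rw [hstep, h]
      rw [hstep2]
      dsimp only
      refine ⟨by omega, ?_, ?_, ?_, by simpa using h4, ?_⟩
      · intro t v hv
        rw [PySem.Dict.get?_insert] at hv
        split at hv
        · cases hv; exact ⟨h0, by omega⟩
        · have := h1 t v hv; omega
      · intro t t' v hv hv'
        rw [PySem.Dict.get?_insert] at hv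
        rw [PySem.Dict.get?_insert] at hv'
        split at hv <;> split at hv'
        · rename_i e1 e2; rw [e1, e2]
        · cases hv; have := h1 t' _ hv'; omega
        · cases hv'; have := h1 t _ hv; omega
        · exact h2 t t' v hv hv'
      · intro t
        rw [PySem.Dict.get?_insert]
        simp only [List.map_append, List.map_cons, List.map_nil, List.mem_append,
          List.mem_singleton]
        split
        · rename_i ht; simp [ht]
        · rename_i ht
          rw [Option.isSome_iff_exists]
          constructor
          · rintro ⟨v, hv⟩
            exact Or.inl ((h3 t).mp (by simp [hv]))
          · rintro (hm | rfl)
            · have := (h3 t).mpr hm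
              rcases Option.isSome_iff_exists.mp this with ⟨v, hv⟩
              exact ⟨v, hv⟩
            · exact absurd rfl ht
      · intro k hk
        simp only [List.length_append, List.length_cons, List.length_nil] at hk
        have hnotin : (a.take pc) ∉ l.map (fun r => r.take pc) := by
          intro hm
          have := (h3 _).mpr hm
          rw [h] at this
          simp at this
        rcases (by omega : k < l.length ∨ k = l.length) with hk' | hk'
        · rw [List.map_append, List.getD_append _ _ _ _ (by simpa using hk'),
            List.getD_append _ _ _ _ (by omega)]
          have hmem : (l.map (fun r => r.take pc)).getD k [] ∈ l.map (fun r => r.take pc) := by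
            rw [List.getD_eq_getElem _ _ (by simpa using hk')]
            exact List.getElem_mem _
          rw [PySem.Dict.get?_insert, if_neg (by intro he; rw [← he] at hnotin; exact hnotin hmem)]
          exact h5 k hk'
        · subst hk'
          rw [List.map_append,
            List.getD_append_right _ _ _ _ (by simp),
            List.getD_append_right _ _ _ _ (by omega)]
          simp only [List.length_map, Nat.sub_self, h4, Nat.sub_self]
          simp [PySem.Dict.get?_insert_self]

-- the dict lookup with default -1 equals the k-th recorded id exactly when the window equals the
-- k-th truncated pattern row
theorem pvLookup_iff (pc : Nat) (pat : List (List Int)) (k : Nat) (hk : k < pat.length)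
    (w : List Int) :
    ((pvFingerprint pc pat).1.getD w (-1) = (pvFingerprint pc pat).2.2.getD k 0) ↔
      w = (pat.map (fun r => r.take pc)).getD k [] := by
  obtain ⟨h0, h1, h2, h3, h4, h5⟩ := pvFingerprint_inv pc pat
  have hks := h5 k hk
  cases h : (pvFingerprint pc pat).1.get? w with
  | some u =>
    rw [PySem.Dict.getD_of_get?_eq_some _ (-1) h]
    constructor
    · intro hu
      exact h2 _ _ _ (by rw [h, hu]) hks
    · intro hw
      rw [hw] at h
      exact Option.some.inj (h.symm.trans hks)
  | none =>
    rw [PySem.Dict.getD_of_get?_eq_none _ (-1) h]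
    constructor
    · intro habs
      have := (h1 _ _ hks).1
      omega
    · intro hw
      rw [hw, hks] at h
      cases h

-- two lists truncated to a common in-range length pc are equal iff they agree cellwise below pc
theorem take_eq_iff_getD (xs ys : List Int) (pc : Nat) (hx : pc ≤ xs.length)
    (hy : pc ≤ ys.length) :
    xs.take pc = ys.take pc ↔ ∀ pj, pj < pc → xs.getD pj 0 = ys.getD pj 0 := by
  constructor
  · intro h pj hpj
    have hx' : pj < xs.length := lt_of_lt_of_le hpj hx
    have hy' : pj < ys.length := lt_of_lt_of_le hpj hy
    rw [List.getD_eq_getElem _ _ hx', List.getD_eq_getElem _ _ hy']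
    have h2 := congrArg (fun l => l[pj]?) h
    simpa [List.getElem?_take, hpj, List.getElem?_eq_getElem, hx', hy'] using h2
  · intro h
    apply List.ext_getElem (by simp [List.length_take]; omega)
    intro i h1' h2'
    have hi : i < pc := by simp [List.length_take] at h1'; omega
    simp only [List.getElem_take]
    have := h i hi
    rwa [List.getD_eq_getElem _ _ (lt_of_lt_of_le hi hx),
      List.getD_eq_getElem _ _ (lt_of_lt_of_le hi hy)] at this

-- the heart of the equivalence: on rectangular inputs that reach the main scan, A's cellwise
-- quadruple scan and B's fingerprint scan compute the same Boolean
theorem pv_main_branch (grid pattern : List (List Int))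
    (hr : pattern.length ≤ grid.length)
    (hc : (pattern.getD 0 []).length ≤ (grid.getD 0 []).length)
    (hrg : ∀ r ∈ grid, (grid.getD 0 []).length ≤ r.length)
    (hrp : ∀ r ∈ pattern, (pattern.getD 0 []).length ≤ r.length) :
    ((List.range (grid.length - pattern.length + 1)).any fun i =>
      (List.range ((grid.getD 0 []).length - (pattern.getD 0 []).length + 1)).any fun j =>
        (List.range pattern.length).all fun pi =>
          (List.range (pattern.getD 0 []).length).all fun pj =>
            ((grid.getD (i + pi) []).getD (j + pj) 0) == ((pattern.getD pi []).getD pj 0))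
    = ((List.range ((grid.getD 0 []).length - (pattern.getD 0 []).length + 1)).any fun j =>
      (List.range (grid.length - pattern.length + 1)).any fun i =>
        (List.range pattern.length).all fun k =>
          (((grid.map (fun row =>
              (List.range ((grid.getD 0 []).length - (pattern.getD 0 []).length + 1)).map
                (fun j => (pvFingerprint (pattern.getD 0 []).length pattern).1.getD
                  ((row.drop j).take (pattern.getD 0 []).length) (-1)))).getD (i + k) []).getD j 0)
            == ((pvFingerprint (pattern.getD 0 []).length pattern).2.2.getD k 0)) := by
  set pc := (pattern.getD 0 []).length with hpc
  set cols := (grid.getD 0 []).length with hcols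
  rw [Bool.eq_iff_iff]
  simp only [List.any_eq_true, List.all_eq_true, List.mem_range, beq_iff_eq]
  have key : ∀ i, i < grid.length - pattern.length + 1 → ∀ j, j < cols - pc + 1 →
      ((∀ k, k < pattern.length →
          (((grid.map (fun row => (List.range (cols - pc + 1)).map
              (fun j => (pvFingerprint pc pattern).1.getD ((row.drop j).take pc) (-1)))).getD
            (i + k) []).getD j 0) = (pvFingerprint pc pattern).2.2.getD k 0)
        ↔ (∀ pi, pi < pattern.length → ∀ pj, pj < pc →
            (grid.getD (i + pi) []).getD (j + pj) 0 = (pattern.getD pi []).getD pj 0)) := by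
    intro i hi j hj
    refine forall_congr' fun k => imp_congr_right fun hk => ?_
    have hik : i + k < grid.length := by omega
    have hrowmem : grid.getD (i + k) [] ∈ grid := by
      rw [List.getD_eq_getElem _ _ hik]; exact List.getElem_mem _
    have hrowlen : cols ≤ (grid.getD (i + k) []).length := hrg _ hrowmem
    have hpatmem : pattern.getD k [] ∈ pattern := by
      rw [List.getD_eq_getElem _ _ hk]; exact List.getElem_mem _
    have hpatlen : pc ≤ (pattern.getD k []).length := hrp _ hpatmem
    have e1 : (grid.map (fun row => (List.range (cols - pc + 1)).map
        (fun j => (pvFingerprint pc pattern).1.getD ((row.drop j).take pc) (-1)))).getD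
          (i + k) []
        = (List.range (cols - pc + 1)).map
            (fun j => (pvFingerprint pc pattern).1.getD
              (((grid.getD (i + k) []).drop j).take pc) (-1)) := by
      rw [List.getD_eq_getElem _ _ (by simpa using hik), List.getElem_map,
        List.getD_eq_getElem _ _ hik]
    have e2 : ((List.range (cols - pc + 1)).map
          (fun j => (pvFingerprint pc pattern).1.getD
            (((grid.getD (i + k) []).drop j).take pc) (-1))).getD j 0
        = (pvFingerprint pc pattern).1.getD (((grid.getD (i + k) []).drop j).take pc) (-1) := by
      rw [List.getD_eq_getElem _ _ (by simpa using hj), List.getElem_map, List.getElem_range]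
    rw [e1, e2, pvLookup_iff pc pattern k hk]
    have e3 : (pattern.map (fun r => r.take pc)).getD k [] = (pattern.getD k []).take pc := by
      rw [List.getD_eq_getElem _ _ (by simpa using hk), List.getElem_map,
        List.getD_eq_getElem _ _ hk]
    rw [e3]
    have hdroplen : pc ≤ ((grid.getD (i + k) []).drop j).length := by
      simp only [List.length_drop]; omega
    rw [take_eq_iff_getD _ _ pc hdroplen hpatlen]
    refine forall_congr' fun pj => imp_congr_right fun hpj => ?_
    have hjpj : j + pj < (grid.getD (i + k) []).length := by omega
    rw [List.getD_eq_getElem _ _ (by simp only [List.length_drop]; omega),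
      List.getElem_drop, List.getD_eq_getElem _ _ hjpj]
  constructor
  · rintro ⟨i, hi, j, hj, hcell⟩
    exact ⟨j, hj, i, hi, (key i hi j hj).mpr hcell⟩
  · rintro ⟨j, hj, i, hi, hid⟩
    exact ⟨i, hi, j, hj, (key i hi j hj).mp hid⟩

-- ===== VERDICT (by name: the statement is the Claim_ definition above) =====
theorem pattern_exists_in_grid_spec : Claim_equal_pattern_exists_in_grid := by
  intro grid pattern _ hpre
  unfold Spec_pattern_exists_in_grid pattern_exists_in_grid pattern_exists_in_grid_alt
  by_cases hp : pattern = []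
  · simp [hp]
  by_cases hg : grid = []
  · simp [hg]
  have hpe : pattern.isEmpty = false := by simpa [List.isEmpty_iff] using hp
  have hge : grid.isEmpty = false := by simpa [List.isEmpty_iff] using hg
  rw [hpe, hge]
  simp only [Bool.or_self, Bool.false_eq_true, if_false]
  by_cases hsz : pattern.length > grid.length ∨ (pattern.getD 0 []).length > (grid.getD 0 []).length
  · rw [if_pos hsz, if_pos hsz]
  · rw [if_neg hsz, if_neg hsz]
    simp only [not_or, not_lt] at hsz
    have hrect : (∀ r ∈ grid, (grid.getD 0 []).length ≤ r.length) ∧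
        (∀ r ∈ pattern, (pattern.getD 0 []).length ≤ r.length) := by
      rcases hpre with h | h | h | h | h
      · exact absurd h hp
      · exact absurd h hg
      · omega
      · omega
      · exact h
    exact pv_main_branch grid pattern hsz.1 hsz.2 hrect.1 hrect.2
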